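-- pv_equiv track=rewrite | github.com/MateiAnton/ontoTextAlignment | code/python/4_ontoEnrich.py | generate_atom_dependency_edges
-- ===== SOURCE A (Python) =====
-- def generate_atom_dependency_edges(simple_onto_graph_edges_dict, atom_to_axiom_ids):
--     generated_edges_dict = {}
--     for dependent_atom, dependent_axioms in atom_to_axiom_ids.items():
--         for dep_axiom in dependent_axioms:
--             target_axioms = simple_onto_graph_edges_dict.get(dep_axiom, [])
--             for target_axiom in target_axioms:
--                 for depended_atom, depended_axioms in atom_to_axiom_ids.items():
--                     if target_axiom in depended_axioms:
--                         edge_key = (dependent_atom, depended_atom)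
--                         generated_edges_dict[edge_key] = generated_edges_dict.get(edge_key, 0) + 1
--     return set(generated_edges_dict.keys())
-- ===== SOURCE B (Python) =====
-- def generate_atom_dependency_edges(simple_onto_graph_edges_dict, atom_to_axiom_ids):
--     # inverted index: axiom id -> atoms (in atom order) whose axiom list contains it
--     atoms_with_axiom = {}
--     for atom, axioms in atom_to_axiom_ids.items():
--         for ax in dict.fromkeys(axioms):  # each atom at most once per axiom
--             atoms_with_axiom.setdefault(ax, []).append(atom)
--     edges = set()
--     for dependent_atom, axioms in atom_to_axiom_ids.items():
--         for ax in axioms: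
--             for target in simple_onto_graph_edges_dict.get(ax, []):
--                 for depended_atom in atoms_with_axiom.get(target, []):
--                     edges.add((dependent_atom, depended_atom))
--     return edges
-- ===== Notes on version B (the rewrite author's own statement) =====
-- stated objective: faster
-- what changed: B precomputes an inverted index axiom-id -> atoms once and looks targets up directly, and collects the edges in a set, replacing A's innermost rescan of all atoms per target and A's edge-count dict.
import Mathlib
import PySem

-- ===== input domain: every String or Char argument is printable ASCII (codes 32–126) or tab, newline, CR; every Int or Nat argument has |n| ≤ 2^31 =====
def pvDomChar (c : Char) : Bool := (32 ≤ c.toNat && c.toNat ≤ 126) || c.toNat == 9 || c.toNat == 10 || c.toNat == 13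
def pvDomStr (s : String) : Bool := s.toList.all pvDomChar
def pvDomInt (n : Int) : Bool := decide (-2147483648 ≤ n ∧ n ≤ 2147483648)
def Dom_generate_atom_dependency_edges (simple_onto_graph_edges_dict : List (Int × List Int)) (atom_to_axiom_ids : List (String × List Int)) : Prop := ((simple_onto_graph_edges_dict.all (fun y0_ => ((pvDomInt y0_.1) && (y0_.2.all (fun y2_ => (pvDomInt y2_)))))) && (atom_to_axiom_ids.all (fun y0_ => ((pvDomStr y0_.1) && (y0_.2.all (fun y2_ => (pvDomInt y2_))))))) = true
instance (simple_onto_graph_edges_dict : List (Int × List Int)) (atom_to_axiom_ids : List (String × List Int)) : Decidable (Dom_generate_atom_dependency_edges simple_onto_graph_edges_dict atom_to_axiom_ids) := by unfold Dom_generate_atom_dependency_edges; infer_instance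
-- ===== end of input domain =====

-- B replaces A's innermost scan of all atoms by a precomputed inverted index axiom->atoms (objective: faster).


-- ===== PORT A =====
-- Literal port of A: nested loops building a counting dict keyed by edge, then set(keys).
def generate_atom_dependency_edges (simple_onto_graph_edges_dict : List (Int × List Int)) (atom_to_axiom_ids : List (String × List Int)) : List (String × String) :=
  let d : PySem.Dict (String × String) Int :=
    atom_to_axiom_ids.foldl (fun d p =>
      p.2.foldl (fun d dep_axiom =>
        ((PySem.Dict.mk simple_onto_graph_edges_dict).getD dep_axiom []).foldl (fun d target_axiom =>
          atom_to_axiom_ids.foldl (fun d q =>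
            if target_axiom ∈ q.2 then
              -- generated_edges_dict[edge_key] = generated_edges_dict.get(edge_key, 0) + 1
              d.modify (p.1, q.1) 0 (· + 1)
            else d) d) d) d) PySem.Dict.empty
  PySem.Set.ofList d.keys

-- ===== PORT B =====
-- B-side helper: inverted index axiom id -> atoms whose (deduplicated) axiom list contains it.
def pvBuildIndex (atom_to_axiom_ids : List (String × List Int)) : PySem.Dict Int (List String) :=
  atom_to_axiom_ids.foldl (fun idx p =>
    (PySem.List.dedup p.2).foldl (fun idx ax =>
      -- index.setdefault(ax, []).append(atom)
      idx.modify ax [] (· ++ [p.1])) idx) PySem.Dict.empty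

def generate_atom_dependency_edges_alt (simple_onto_graph_edges_dict : List (Int × List Int)) (atom_to_axiom_ids : List (String × List Int)) : List (String × String) :=
  let idx := pvBuildIndex atom_to_axiom_ids
  atom_to_axiom_ids.foldl (fun (edges : PySem.Set (String × String)) p =>
    p.2.foldl (fun edges ax =>
      ((PySem.Dict.mk simple_onto_graph_edges_dict).getD ax []).foldl (fun edges target =>
        (idx.getD target []).foldl (fun edges depended =>
          PySem.Set.add edges (p.1, depended)) edges) edges) edges) PySem.Set.empty

-- ===== PRECONDITION & SPEC =====
def Spec_generate_atom_dependency_edges (simple_onto_graph_edges_dict : List (Int × List Int)) (atom_to_axiom_ids : List (String × List Int)) (out : List (String × String)) : Prop := out = generate_atom_dependency_edges_alt simple_onto_graph_edges_dict atom_to_axiom_ids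
instance (simple_onto_graph_edges_dict : List (Int × List Int)) (atom_to_axiom_ids : List (String × List Int)) (out : List (String × String)) : Decidable (Spec_generate_atom_dependency_edges simple_onto_graph_edges_dict atom_to_axiom_ids out) := by unfold Spec_generate_atom_dependency_edges; infer_instance

-- ===== CLAIM (what is proved, stated in full; the proofs are below) =====
def Claim_equal_generate_atom_dependency_edges : Prop := ∀ (simple_onto_graph_edges_dict : List (Int × List Int)) (atom_to_axiom_ids : List (String × List Int)), Dom_generate_atom_dependency_edges simple_onto_graph_edges_dict atom_to_axiom_ids → Spec_generate_atom_dependency_edges simple_onto_graph_edges_dict atom_to_axiom_ids (generate_atom_dependency_edges simple_onto_graph_edges_dict atom_to_axiom_ids)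

-- ===== LEMMAS AND PROOFS =====

-- innermost loop of A = fold of the same dict update over the filtered-and-projected atom list
theorem pv_inner_filter (t : Int) (x : String) (a : List (String × List Int))
    (d : PySem.Dict (String × String) Int) :
    a.foldl (fun d q => if t ∈ q.2 then d.modify (x, q.1) 0 (· + 1) else d) d
      = ((a.filter (fun q => decide (t ∈ q.2))).map (·.1)).foldl
          (fun d n => d.modify (x, n) 0 (· + 1)) d := by
  rw [List.foldl_map, List.foldl_filter]
  simp

-- the filtered-on-a-nodup-list characterisation of one index entry
theorem pv_dedup_filter_eq (l : List Int) (t : Int) :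
    (PySem.List.dedup l).filter (· == t) = if t ∈ l then [t] else [] := by
  rw [List.filter_beq]
  by_cases h : t ∈ l
  · rw [if_pos h, List.count_eq_one_of_mem (PySem.List.nodup_dedup l) ((PySem.List.mem_dedup _ _).mpr h)]
    rfl
  · rw [if_neg h, List.count_eq_zero.mpr (fun hm => h ((PySem.List.mem_dedup _ _).mp hm))]
    rfl

theorem pv_index_aux (t : Int) :
    ∀ (a : List (String × List Int)) (d : PySem.Dict Int (List String)),
    (a.foldl (fun idx p =>
        (PySem.List.dedup p.2).foldl (fun idx ax => idx.modify ax [] (· ++ [p.1])) idx) d).getD t []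
      = d.getD t [] ++ (a.filter (fun q => decide (t ∈ q.2))).map (·.1) := by
  intro a
  induction a with
  | nil => intro d; simp
  | cons p rest ih =>
    intro d
    simp only [List.foldl_cons]
    rw [ih]
    have h1 : (PySem.List.dedup p.2).foldl (fun idx ax => idx.modify ax [] (· ++ [p.1])) d
        = ((PySem.List.dedup p.2).map (fun ax => (ax, p.1))).foldl
            (fun idx q => idx.modify q.1 [] (· ++ [q.2])) d := by
      rw [List.foldl_map]
    rw [h1, PySem.Dict.getD_foldl_modify_append]
    have h2 : (((PySem.List.dedup p.2).map (fun ax => (ax, p.1))).filter (fun q => q.1 == t)).map (·.2)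
        = if t ∈ p.2 then [p.1] else [] := by
      rw [List.filter_map]
      have hp : ((fun q => q.1 == t) ∘ fun ax => (ax, p.1)) = (fun ax : Int => ax == t) := by
        funext ax; simp
      rw [hp, pv_dedup_filter_eq]
      by_cases hm : t ∈ p.2 <;> simp [hm]
    rw [h2]
    by_cases hm : t ∈ p.2
    · simp [hm]
    · simp [hm]

theorem pv_index_getD (a : List (String × List Int)) (t : Int) :
    (pvBuildIndex a).getD t [] = (a.filter (fun q => decide (t ∈ q.2))).map (·.1) := by
  unfold pvBuildIndex
  rw [pv_index_aux]
  simp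

-- generic lifts: keys of a dict-valued fold, and Nodup through a list-valued fold
theorem pv_lift_keys {β κ ν : Type} [BEq κ] (F : β → PySem.Dict κ ν → PySem.Dict κ ν)
    (G : β → List κ → List κ) (h : ∀ b d, (F b d).keys = G b d.keys) :
    ∀ (l : List β) (d : PySem.Dict κ ν),
      (l.foldl (fun d b => F b d) d).keys = l.foldl (fun s b => G b s) d.keys := by
  intro l
  induction l with
  | nil => intro d; rfl
  | cons b rest ih => intro d; simp only [List.foldl_cons]; rw [ih, h]

theorem pv_lift_nodup {β κ : Type} (G : β → List κ → List κ)
    (h : ∀ b s, s.Nodup → (G b s).Nodup) :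
    ∀ (l : List β) (s : List κ), s.Nodup → (l.foldl (fun s b => G b s) s).Nodup := by
  intro l
  induction l with
  | nil => intro s hs; exact hs
  | cons b rest ih => intro s hs; simp only [List.foldl_cons]; exact ih _ (h b s hs)

-- innermost level: dict keys evolve exactly as the Set.add fold
theorem pv_keys_inner (x : String) (names : List String) (d : PySem.Dict (String × String) Int) :
    (names.foldl (fun d n => d.modify (x, n) 0 (· + 1)) d).keys
      = names.foldl (fun s n => PySem.Set.add s (x, n)) d.keys := by
  rw [PySem.Dict.keys_foldl_modify_key (key := fun n => (x, n)),
      ← PySem.Set.update_map_eq_foldl_add]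


-- ===== VERDICT (by name: the statement is the Claim_ definition above) =====
theorem generate_atom_dependency_edges_spec : Claim_equal_generate_atom_dependency_edges := by
  intro g a _
  unfold Spec_generate_atom_dependency_edges generate_atom_dependency_edges generate_atom_dependency_edges_alt
  simp only [pv_inner_filter, ← pv_index_getD]
  rw [pv_lift_keys
        (F := fun p d => p.2.foldl (fun d ax =>
          ((PySem.Dict.mk g).getD ax []).foldl (fun d target =>
            ((pvBuildIndex a).getD target []).foldl (fun d n => d.modify (p.1, n) 0 (· + 1)) d) d) d)
        (G := fun p s => p.2.foldl (fun s ax =>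
          ((PySem.Dict.mk g).getD ax []).foldl (fun s target =>
            ((pvBuildIndex a).getD target []).foldl (fun s n => PySem.Set.add s (p.1, n)) s) s) s)
        (fun p d => pv_lift_keys _ _ (fun ax d => pv_lift_keys _ _ (fun target d => pv_keys_inner p.1 _ d) _ d) p.2 d)
        a PySem.Dict.empty]
  rw [PySem.Dict.keys_empty]
  apply PySem.Set.ofList_eq_self_of_nodup
  exact pv_lift_nodup _
    (fun p s hs => pv_lift_nodup _
      (fun ax s hs => pv_lift_nodup _
        (fun target s hs => pv_lift_nodup _ (fun n s hs => PySem.Set.nodup_add _ _ hs) _ s hs) _ s hs) _ s hs)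
    a [] List.nodup_nil
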